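-- pv_equiv track=rewrite | github.com/AndrewAnnex/asap_stereo | src/asap_stereo/asap.py | kwargs_to_args
-- ===== SOURCE A (Python) =====
-- from typing import Optional, Dict, List, Tuple, Union, Callable
-- import itertools
--
-- def kwargs_to_args(kwargs: Dict)-> List:
--     keys = []
--     # ensure keys start with '--' for asp scripts
--     for key in kwargs.keys():
--         key = str(key)
--         if key not in ('--t_srs', '--t_projwin'):
--             key = key.replace('_', '-')
--         if not key.startswith('--') and len(key) > 1:
--             keys.append(f'--{key}')
--         elif not key.startswith('-'):
--             keys.append(f'-{key}')
--         else:
--             keys.append(key)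
--     return [x for x in itertools.chain.from_iterable(itertools.zip_longest(keys, kwargs.values())) if x is not None]
-- ===== SOURCE B (Python) =====
-- def kwargs_to_args(kwargs):
--     args = []
--     for key, value in kwargs.items():
--         key = str(key)
--         if key not in ('--t_srs', '--t_projwin'):
--             key = key.replace('_', '-')
--         if not key.startswith('--') and len(key) > 1:
--             key = f'--{key}'
--         elif not key.startswith('-'):
--             key = f'-{key}'
--         args.append(key)
--         if value is not None:
--             args.append(value)
--     return args
-- ===== Notes on version B (the rewrite author's own statement) =====
-- stated objective: simpler
-- what changed: Single pass over kwargs.items() appending the normalized key and, when present, the value directly, replacing A's separate keys list plus itertools.zip_longest/chain.from_iterable/None-filter pipeline.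
import Mathlib
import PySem

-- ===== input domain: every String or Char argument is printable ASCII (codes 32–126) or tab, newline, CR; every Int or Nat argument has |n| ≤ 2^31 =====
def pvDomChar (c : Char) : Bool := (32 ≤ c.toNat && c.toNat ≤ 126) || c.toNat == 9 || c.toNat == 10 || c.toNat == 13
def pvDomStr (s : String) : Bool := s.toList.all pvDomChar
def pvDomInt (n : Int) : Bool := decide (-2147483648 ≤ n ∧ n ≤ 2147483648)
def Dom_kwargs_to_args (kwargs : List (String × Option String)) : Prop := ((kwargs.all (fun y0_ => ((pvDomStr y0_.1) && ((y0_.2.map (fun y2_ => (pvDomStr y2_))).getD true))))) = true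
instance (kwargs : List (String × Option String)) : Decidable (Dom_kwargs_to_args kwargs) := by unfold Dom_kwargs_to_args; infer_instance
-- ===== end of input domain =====

-- B replaces A's keys-list + itertools.zip_longest/chain/None-filter pipeline by one pass that
-- appends the normalized key and, when present, the value (objective: simpler).

-- ===== PORT A =====

-- key normalization shared verbatim by both Pythons (the inline body of A's key loop = B's per-key code)
def pvNormKey (key : String) : String :=
  let key1 := if key = "--t_srs" ∨ key = "--t_projwin" then key
              else PySem.Str.replace key "_" "-"
  if ¬ PySem.Str.startswith key1 "--" ∧ PySem.Str.len key1 > 1 then "--" ++ key1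
  else if ¬ PySem.Str.startswith key1 "-" then "-" ++ key1
  else key1

-- itertools.zip_longest with fillvalue None, on the two sequences A builds
def pvZipLongest : List String → List (Option String) → List (Option String × Option String)
  | [], [] => []
  | [], v :: vs => (none, v) :: pvZipLongest [] vs
  | k :: ks, [] => (some k, none) :: pvZipLongest ks []
  | k :: ks, v :: vs => (some k, v) :: pvZipLongest ks vs

def kwargs_to_args (kwargs : List (String × Option String)) : List String :=
  let keys := kwargs.foldl (fun ks kv => ks ++ [pvNormKey kv.1]) []
  let vals := kwargs.map (fun kv => kv.2)
  -- [x for x in chain.from_iterable(zip_longest(keys, values)) if x is not None]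
  ((pvZipLongest keys vals).flatMap (fun p => [p.1, p.2])).filterMap id

-- ===== PORT B =====
def kwargs_to_args_alt (kwargs : List (String × Option String)) : List String :=
  kwargs.foldl (fun args kv =>
    let args := args ++ [pvNormKey kv.1]
    match kv.2 with
    | some v => args ++ [v]
    | none => args) []

-- ===== PRECONDITION & SPEC =====
def Spec_kwargs_to_args (kwargs : List (String × Option String)) (out : List String) : Prop := out = kwargs_to_args_alt kwargs
instance (kwargs : List (String × Option String)) (out : List String) : Decidable (Spec_kwargs_to_args kwargs out) := by unfold Spec_kwargs_to_args; infer_instance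

-- ===== CLAIM (what is proved, stated in full; the proofs are below) =====
def Claim_equal_kwargs_to_args : Prop := ∀ (kwargs : List (String × Option String)), Dom_kwargs_to_args kwargs → Spec_kwargs_to_args kwargs (kwargs_to_args kwargs)

-- ===== LEMMAS AND PROOFS =====

theorem pvZipLongest_map (l : List (String × Option String)) :
    pvZipLongest (l.map (fun kv => pvNormKey kv.1)) (l.map (fun kv => kv.2))
      = l.map (fun kv => (some (pvNormKey kv.1), kv.2)) := by
  induction l with
  | nil => simp [pvZipLongest]
  | cons kv l ih => simpa [pvZipLongest] using ih

theorem kwargs_to_args_eq_flatMap (kwargs : List (String × Option String)) :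
    kwargs_to_args kwargs
      = kwargs.flatMap (fun kv => pvNormKey kv.1 :: kv.2.toList) := by
  simp only [kwargs_to_args]
  rw [PySem.List.foldl_append_singleton_eq_map, List.nil_append, pvZipLongest_map]
  induction kwargs with
  | nil => simp [pvZipLongest]
  | cons kv l ih =>
    obtain ⟨k, v⟩ := kv; cases v <;> simp_all

theorem kwargs_to_args_alt_eq_flatMap (kwargs : List (String × Option String)) :
    kwargs_to_args_alt kwargs
      = kwargs.flatMap (fun kv => pvNormKey kv.1 :: kv.2.toList) := by
  unfold kwargs_to_args_alt
  have h : (fun (args : List String) (kv : String × Option String) =>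
      let args := args ++ [pvNormKey kv.1]
      match kv.2 with
      | some v => args ++ [v]
      | none => args)
      = (fun args kv => args ++ (pvNormKey kv.1 :: kv.2.toList)) := by
    funext args kv
    cases kv.2 <;> simp
  rw [h, PySem.List.foldl_append_eq_flatMap, List.nil_append]

-- ===== VERDICT (by name: the statement is the Claim_ definition above) =====
theorem kwargs_to_args_spec : Claim_equal_kwargs_to_args := by
  intro kwargs _
  unfold Spec_kwargs_to_args
  rw [kwargs_to_args_eq_flatMap, kwargs_to_args_alt_eq_flatMap]
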